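-- pv_equiv track=rewrite | github.com/clivepato93/Edabit_challenges | Python/Hard/is_shuffled_well.py | is_shuffled_well
-- ===== SOURCE A (Python) =====
-- def is_shuffled_well(lst):
--     c=0
--     check=list(zip(lst,lst[1:]))
--     for a,b in check:
--         if c==2:
--             return False
--         if abs(a-b)==1:
--             c+=1
--         else:
--             c=0
--     return True
-- ===== SOURCE B (Python) =====
-- def is_shuffled_well(lst):
--     return not any(abs(lst[i] - lst[i + 1]) == 1 and abs(lst[i + 1] - lst[i + 2]) == 1
--                    for i in range(len(lst) - 2))
-- ===== Notes on version B (the rewrite author's own statement) =====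
-- stated objective: simpler
-- what changed: Replaces the zip+counter state machine with a direct window scan over indices 0..len-3 that reports False as soon as three consecutive elements are pairwise adjacent in value.
-- intended difference: On lists of length >= 3 whose only run of three pairwise-adjacent elements starts at the last three positions, A returns True (its counter is only tested on the next pair, which does not exist) while B returns False, the intended verdict since such a tail is still a bad shuffle. — e.g. on is_shuffled_well([1, 2, 3]): A returns true, B returns false
import Mathlib
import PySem

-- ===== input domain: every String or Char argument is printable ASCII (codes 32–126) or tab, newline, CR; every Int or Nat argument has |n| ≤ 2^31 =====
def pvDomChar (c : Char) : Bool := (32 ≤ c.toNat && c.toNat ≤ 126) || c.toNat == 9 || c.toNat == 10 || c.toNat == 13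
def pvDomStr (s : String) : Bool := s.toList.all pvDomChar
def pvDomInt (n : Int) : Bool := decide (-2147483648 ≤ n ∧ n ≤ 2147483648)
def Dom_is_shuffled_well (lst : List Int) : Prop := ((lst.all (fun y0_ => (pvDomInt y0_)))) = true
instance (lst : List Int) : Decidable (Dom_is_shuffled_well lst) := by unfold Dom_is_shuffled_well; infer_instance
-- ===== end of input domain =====

-- B replaces A's zip+counter state machine by a direct three-element window scan (objective: simpler);
-- B differs intentionally from A on the inputs described at D_is_shuffled_well below.

-- ===== PORT A =====
-- the for-loop over check with state c and early 'return False'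
def pvLoopA : List (Int × Int) → Int → Bool
  | [], _ => true
  | (a, b) :: rest, c =>
    if c == 2 then false
    else if (a - b).natAbs == 1 then pvLoopA rest (c + 1)
    else pvLoopA rest 0

def is_shuffled_well (lst : List Int) : Bool :=
  -- check = list(zip(lst, lst[1:]))
  pvLoopA (lst.zip (PySem.List.slice lst (some 1) none)) 0

-- ===== PORT B =====
def is_shuffled_well_alt (lst : List Int) : Bool :=
  -- not any(... for i in range(len(lst)-2)); negative range is empty, matching Nat subtraction
  !((List.range (lst.length - 2)).any fun i =>
      ((lst.getD i 0 - lst.getD (i + 1) 0).natAbs == 1) &&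
      ((lst.getD (i + 1) 0 - lst.getD (i + 2) 0).natAbs == 1))

-- ===== PRECONDITION & SPEC =====
-- input-shape test: the three-element window of lst starting at index j consists of
-- pairwise neighbouring values (each pair differs by exactly one, in either direction)
def pvRunB (lst : List Int) (j : Nat) : Bool :=
  match lst.drop j with
  | x :: y :: z :: _ => (y == x + 1 || x == y + 1) && (z == y + 1 || y == z + 1)
  | _ => false

-- On lists of length ≥ 3 whose ONLY run of three pairwise-adjacent elements starts at the last three
-- positions, A returns True (its counter is only tested on the next pair, which does not exist) while
-- B returns False, the intended verdict since such a tail is still a bad shuffle.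
def D_is_shuffled_well (lst : List Int) : Prop :=
  3 ≤ lst.length ∧ pvRunB lst (lst.length - 3) = true ∧
  ∀ j < lst.length, j + 3 < lst.length → pvRunB lst j = false

instance (lst : List Int) : Decidable (D_is_shuffled_well lst) := by
  unfold D_is_shuffled_well; infer_instance

def Spec_is_shuffled_well (lst : List Int) (out : Bool) : Prop :=
  ¬ D_is_shuffled_well lst → out = is_shuffled_well_alt lst
instance (lst : List Int) (out : Bool) : Decidable (Spec_is_shuffled_well lst out) := by
  unfold Spec_is_shuffled_well; infer_instance

def pvDiffWitness_is_shuffled_well : List Int := [1, 2, 3]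
def pvDiffWitnessOut_is_shuffled_well : Bool × Bool := (true, false)

-- ===== CLAIM (what is proved, stated in full; the proofs are below) =====
def Claim_unchanged_is_shuffled_well : Prop := ∀ (lst : List Int), Dom_is_shuffled_well lst → Spec_is_shuffled_well lst (is_shuffled_well lst)
def Claim_changed_is_shuffled_well : Prop := Dom_is_shuffled_well (pvDiffWitness_is_shuffled_well) ∧ D_is_shuffled_well (pvDiffWitness_is_shuffled_well) ∧ is_shuffled_well (pvDiffWitness_is_shuffled_well) = pvDiffWitnessOut_is_shuffled_well.1 ∧ is_shuffled_well_alt (pvDiffWitness_is_shuffled_well) = pvDiffWitnessOut_is_shuffled_well.2 ∧ pvDiffWitnessOut_is_shuffled_well.1 ≠ pvDiffWitnessOut_is_shuffled_well.2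
def Claim_exact_is_shuffled_well : Prop := ∀ (lst : List Int), Dom_is_shuffled_well lst → D_is_shuffled_well lst → is_shuffled_well lst ≠ is_shuffled_well_alt lst

-- ===== LEMMAS AND PROOFS =====

-- internal (proof-only) getD form of the window condition, matching the ports' arithmetic
def pvRunAt (lst : List Int) (j : Nat) : Prop :=
  (lst.getD j 0 - lst.getD (j + 1) 0).natAbs = 1 ∧
  (lst.getD (j + 1) 0 - lst.getD (j + 2) 0).natAbs = 1

lemma pvDrop_three (lst : List Int) (j : Nat) (h : j + 2 < lst.length) :
    lst.drop j = lst.getD j 0 :: lst.getD (j + 1) 0 :: lst.getD (j + 2) 0 :: lst.drop (j + 3) := by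
  induction lst generalizing j with
  | nil => simp at h
  | cons x t ih =>
    cases j with
    | zero =>
      cases t with
      | nil => simp at h
      | cons y s =>
        cases s with
        | nil => simp at h
        | cons z r => simp
    | succ k => simpa using ih k (by simp at h; omega)

lemma pvRun_iff (lst : List Int) (j : Nat) (h : j + 2 < lst.length) :
    pvRunB lst j = true ↔ pvRunAt lst j := by
  unfold pvRunB pvRunAt
  rw [pvDrop_three lst j h]
  simp only [Bool.and_eq_true, Bool.or_eq_true, beq_iff_eq]
  constructor
  · rintro ⟨h1, h2⟩; exact ⟨by omega, by omega⟩
  · rintro ⟨h1, h2⟩; exact ⟨by omega, by omega⟩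

def pvAdjP (p : Int × Int) : Prop := (p.1 - p.2).natAbs = 1

-- the condition under which pvLoopA ps 0 returns false
def pvE0 (ps : List (Int × Int)) : Prop :=
  ∃ j, j + 2 < ps.length ∧ pvAdjP (ps.getD j (0, 0)) ∧ pvAdjP (ps.getD (j + 1) (0, 0))

lemma pvE0_ne_nil {ps : List (Int × Int)} (h : pvE0 ps) : ps ≠ [] := by
  obtain ⟨j, hj, -⟩ := h
  intro he; subst he; simp at hj

lemma pvLoop2_false (ps : List (Int × Int)) : pvLoopA ps 2 = false ↔ ps ≠ [] := by
  cases ps with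
  | nil => simp [pvLoopA]
  | cons p t => cases p; simp [pvLoopA]

lemma pvE0_cons (p : Int × Int) (t : List (Int × Int)) :
    pvE0 (p :: t) ↔ (1 < t.length ∧ pvAdjP p ∧ pvAdjP (t.getD 0 (0, 0))) ∨ pvE0 t := by
  constructor
  · rintro ⟨j, hj, h1, h2⟩
    cases j with
    | zero =>
      left
      simp only [List.getD_cons_zero, List.getD_cons_succ, List.length_cons] at h1 h2 hj
      exact ⟨by omega, h1, h2⟩
    | succ k =>
      right
      exact ⟨k, by simp at hj; omega, by simpa using h1, by simpa using h2⟩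
  · rintro (⟨hl, h1, h2⟩ | ⟨j, hj, h1, h2⟩)
    · exact ⟨0, by simp; omega, by simpa using h1, by simpa using h2⟩
    · exact ⟨j + 1, by simp; omega, by simpa using h1, by simpa using h2⟩

lemma pvLoop_char (ps : List (Int × Int)) :
    (pvLoopA ps 0 = false ↔ pvE0 ps) ∧
    (pvLoopA ps 1 = false ↔ (1 < ps.length ∧ pvAdjP (ps.getD 0 (0, 0))) ∨ pvE0 ps) := by
  induction ps with
  | nil =>
    refine ⟨by simp [pvLoopA]; intro h; exact pvE0_ne_nil h rfl, ?_⟩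
    simp only [pvLoopA, List.length_nil]
    constructor
    · intro h; simp at h
    · rintro (⟨h, -⟩ | h)
      · omega
      · exact absurd rfl (pvE0_ne_nil h)
  | cons p t ih =>
    obtain ⟨ih0, ih1⟩ := ih
    obtain ⟨a, b⟩ := p
    by_cases hadj : (a - b).natAbs = 1
    · constructor
      · rw [show pvLoopA ((a, b) :: t) 0 = pvLoopA t 1 by simp [pvLoopA, hadj],
            pvE0_cons, ih1]
        constructor
        · rintro (⟨hl, h2⟩ | h)
          · exact Or.inl ⟨hl, hadj, h2⟩
          · exact Or.inr h
        · rintro (⟨hl, -, h2⟩ | h)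
          · exact Or.inl ⟨hl, h2⟩
          · exact Or.inr h
      · rw [show pvLoopA ((a, b) :: t) 1 = pvLoopA t 2 by simp [pvLoopA, hadj],
            pvLoop2_false, pvE0_cons]
        constructor
        · intro ht
          exact Or.inl ⟨by simpa using List.length_pos_iff.mpr ht, hadj⟩
        · rintro (⟨hl, -⟩ | (⟨hl, -, -⟩ | h))
          · intro he; subst he; simp at hl
          · intro he; subst he; simp at hl
          · exact pvE0_ne_nil h
    · have hstep0 : pvLoopA ((a, b) :: t) 0 = pvLoopA t 0 := by simp [pvLoopA, hadj]
      have hstep1 : pvLoopA ((a, b) :: t) 1 = pvLoopA t 0 := by simp [pvLoopA, hadj]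
      constructor
      · rw [hstep0, pvE0_cons, ih0]
        constructor
        · exact Or.inr
        · rintro (⟨-, h1, -⟩ | h)
          · exact absurd h1 hadj
          · exact h
      · rw [hstep1, pvE0_cons, ih0]
        constructor
        · intro h; exact Or.inr (Or.inr h)
        · rintro (⟨-, h1⟩ | (⟨-, h1, -⟩ | h))
          · exact absurd h1 hadj
          · exact absurd h1 hadj
          · exact h

-- the pair list really is lst's adjacent pairs
lemma pvZip_getD (lst : List Int) (j : Nat) (hj : j + 1 < lst.length) :
    (lst.zip (lst.tail)).getD j (0, 0) = (lst.getD j 0, lst.getD (j + 1) 0) := by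
  induction lst generalizing j with
  | nil => simp at hj
  | cons x t ih =>
    cases t with
    | nil => simp at hj
    | cons y s =>
      cases j with
      | zero => simp
      | succ k =>
        have := ih (j := k) (by simp at hj ⊢; omega)
        simpa using this

lemma pvZip_length (lst : List Int) : (lst.zip lst.tail).length = lst.length - 1 := by
  simp [List.length_zip]

-- A = false iff a run of three adjacent values starts at some j with j+3 < len
lemma charA (lst : List Int) :
    is_shuffled_well lst = false ↔ ∃ j, j + 3 < lst.length ∧ pvRunAt lst j := by
  unfold is_shuffled_well
  rw [PySem.List.slice_from_one, (pvLoop_char _).1]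
  constructor
  · rintro ⟨j, hj, h1, h2⟩
    rw [pvZip_length] at hj
    rw [pvZip_getD lst j (by omega)] at h1
    rw [pvZip_getD lst (j + 1) (by omega)] at h2
    exact ⟨j, by omega, h1, h2⟩
  · rintro ⟨j, hj, h1, h2⟩
    refine ⟨j, by rw [pvZip_length]; omega, ?_, ?_⟩
    · rw [pvZip_getD lst j (by omega)]; exact h1
    · rw [pvZip_getD lst (j + 1) (by omega)]; exact h2

-- B = false iff a run of three adjacent values starts at some j with j+2 < len
lemma charB (lst : List Int) :
    is_shuffled_well_alt lst = false ↔ ∃ j, j + 2 < lst.length ∧ pvRunAt lst j := by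
  unfold is_shuffled_well_alt
  simp only [Bool.not_eq_false', List.any_eq_true, List.mem_range, Bool.and_eq_true,
    beq_iff_eq]
  constructor
  · rintro ⟨i, hi, h1, h2⟩
    exact ⟨i, by omega, h1, h2⟩
  · rintro ⟨j, hj, h1, h2⟩
    exact ⟨j, by omega, h1, h2⟩

-- ===== VERDICT (by name: the statement is the Claim_ definition above) =====
theorem is_shuffled_well_spec : Claim_unchanged_is_shuffled_well := by
  intro lst _ hD
  by_cases h : ∃ j, j + 3 < lst.length ∧ pvRunAt lst j
  · obtain ⟨j, hj, hr⟩ := h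
    rw [(charA lst).mpr ⟨j, hj, hr⟩, Eq.symm ((charB lst).mpr ⟨j, by omega, hr⟩)]
  · have hA : is_shuffled_well lst = true := by
      rcases Bool.eq_false_or_eq_true (is_shuffled_well lst) with ht | hf
      · exact ht
      · exact absurd ((charA lst).mp hf) h
    have hB : is_shuffled_well_alt lst = true := by
      rcases Bool.eq_false_or_eq_true (is_shuffled_well_alt lst) with ht | hf
      · exact ht
      · obtain ⟨j, hj, hr⟩ := (charB lst).mp hf
        have hj3 : ¬ j + 3 < lst.length := fun hc => h ⟨j, hc, hr⟩
        have hjlen : j = lst.length - 3 := by omega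
        refine absurd ⟨by omega, ?_, ?_⟩ hD
        · exact (pvRun_iff lst (lst.length - 3) (by omega)).mpr (hjlen ▸ hr)
        · intro k hk hk3
          rcases Bool.eq_false_or_eq_true (pvRunB lst k) with ht | hf
          · exact absurd ⟨k, hk3, (pvRun_iff lst k (by omega)).mp ht⟩ h
          · exact hf
    rw [hA, hB]

theorem is_shuffled_well_changed : Claim_changed_is_shuffled_well := by
  unfold Claim_changed_is_shuffled_well; decide

theorem is_shuffled_well_tight : Claim_exact_is_shuffled_well := by
  intro lst _ hD
  obtain ⟨hlen, hrun, hno⟩ := hD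
  have hA : is_shuffled_well lst = true := by
    rcases Bool.eq_false_or_eq_true (is_shuffled_well lst) with ht | hf
    · exact ht
    · obtain ⟨j, hj, hr⟩ := (charA lst).mp hf
      have := hno j (by omega) hj
      rw [(pvRun_iff lst j (by omega)).mpr hr] at this
      exact absurd this (by simp)
  have hB : is_shuffled_well_alt lst = false :=
    (charB lst).mpr ⟨lst.length - 3, by omega,
      (pvRun_iff lst (lst.length - 3) (by omega)).mp hrun⟩
  rw [hA, hB]; decide
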